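-- pv_equiv track=rewrite | github.com/scscodes/valheim-world-engine | etl/archive/legacy/backend/app/services/warm_world_generator.py | _check_completion_signals
-- ===== SOURCE A (Python) =====
-- def _check_completion_signals(logs: str) -> bool:
--     """Check logs for world generation completion signals"""
--     completion_signals = [
--         "Game server connected",
--         "Zonesystem Start",
--         "Export complete",
--         "World generation complete",
--         "VWE: Export finished"
--     ]
--
--     for signal in completion_signals:
--         if signal in logs:
--             return True
--
--     return False
-- ===== SOURCE B (Python) =====
-- def _check_completion_signals(logs: str) -> bool:
--     """Check logs for world generation completion signals (single left-to-right scan)."""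
--     signals = (
--         "Game server connected",
--         "Zonesystem Start",
--         "Export complete",
--         "World generation complete",
--         "VWE: Export finished",
--     )
--     # One pass over positions: at each position test whether any signal starts there,
--     # instead of one full substring search per signal.
--     for i in range(len(logs) + 1):
--         if any(logs.startswith(sig, i) for sig in signals):
--             return True
--     return False
-- ===== Notes on version B (the rewrite author's own statement) =====
-- stated objective: alternative
-- what changed: Replaced the per-signal substring searches (one full scan of logs for each of the five signals, early return) by a single left-to-right scan that at each position tests whether any signal starts there.
import Mathlib
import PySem

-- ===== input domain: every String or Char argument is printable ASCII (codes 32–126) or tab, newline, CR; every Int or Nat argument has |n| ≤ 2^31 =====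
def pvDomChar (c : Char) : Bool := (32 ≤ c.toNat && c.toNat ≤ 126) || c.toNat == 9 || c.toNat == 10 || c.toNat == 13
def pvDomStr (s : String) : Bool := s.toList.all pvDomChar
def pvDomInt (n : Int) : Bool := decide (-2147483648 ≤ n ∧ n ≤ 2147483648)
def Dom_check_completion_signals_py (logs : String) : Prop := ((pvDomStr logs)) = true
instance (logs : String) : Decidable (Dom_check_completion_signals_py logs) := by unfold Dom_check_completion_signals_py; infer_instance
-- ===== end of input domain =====

-- ===== PORT A =====
-- B changes structure only: A scans logs once per signal; B scans logs once, testing all signals at each position.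
def check_completion_signals_py (logs : String) : Bool :=
  let completion_signals : List String :=
    ["Game server connected",
     "Zonesystem Start",
     "Export complete",
     "World generation complete",
     "VWE: Export finished"]
  completion_signals.any (fun signal => PySem.Str.isIn signal logs)

-- ===== PORT B =====
def pvSignalsB : List (List Char) :=
  ["Game server connected".toList,
   "Zonesystem Start".toList,
   "Export complete".toList,
   "World generation complete".toList,
   "VWE: Export finished".toList]

-- single scan: at each position (suffix) test whether any signal starts there
def pvScanB (cs : List Char) : Bool :=
  if pvSignalsB.any (fun sig => sig.isPrefixOf cs) then true
  else
    match cs with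
    | [] => false
    | _ :: t => pvScanB t

def check_completion_signals_py_alt (logs : String) : Bool :=
  pvScanB logs.toList

-- ===== PRECONDITION & SPEC =====
def Spec_check_completion_signals_py (logs : String) (out : Bool) : Prop := out = check_completion_signals_py_alt logs
instance (logs : String) (out : Bool) : Decidable (Spec_check_completion_signals_py logs out) := by unfold Spec_check_completion_signals_py; infer_instance

-- ===== CLAIM (what is proved, stated in full; the proofs are below) =====
def Claim_equal_check_completion_signals_py : Prop := ∀ (logs : String), Dom_check_completion_signals_py logs → Spec_check_completion_signals_py logs (check_completion_signals_py logs)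

-- ===== LEMMAS AND PROOFS =====

lemma pvScanB_iff (cs : List Char) :
    pvScanB cs = true ↔ ∃ sig ∈ pvSignalsB, sig <:+: cs := by
  induction cs with
  | nil =>
    simp [pvScanB, List.any_eq_true, List.isPrefixOf_iff_prefix]
  | cons c t ih =>
    rw [pvScanB]
    by_cases h : pvSignalsB.any (fun sig => sig.isPrefixOf (c :: t)) = true
    · rw [if_pos h]
      simp only [true_iff]
      rcases List.any_eq_true.mp h with ⟨sig, hmem, hpre⟩
      exact ⟨sig, hmem, (List.isPrefixOf_iff_prefix.mp hpre).isInfix⟩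
    · rw [if_neg h]
      show pvScanB t = true ↔ _
      rw [ih]
      constructor
      · rintro ⟨sig, hmem, hinf⟩
        exact ⟨sig, hmem, List.infix_cons_iff.mpr (Or.inr hinf)⟩
      · rintro ⟨sig, hmem, hinf⟩
        rcases List.infix_cons_iff.mp hinf with hpre | hinf'
        · refine absurd (List.any_eq_true.mpr ⟨sig, hmem, ?_⟩) h
          exact List.isPrefixOf_iff_prefix.mpr hpre
        · exact ⟨sig, hmem, hinf'⟩

-- ===== VERDICT (by name: the statement is the Claim_ definition above) =====
theorem check_completion_signals_py_spec : Claim_equal_check_completion_signals_py := by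
  intro logs _
  unfold Spec_check_completion_signals_py
  have hA : check_completion_signals_py logs = true ↔
      ∃ sig ∈ pvSignalsB, sig <:+: logs.toList := by
    simp [check_completion_signals_py, PySem.Chars.isIn_iff_infix, pvSignalsB]
  have hB : check_completion_signals_py_alt logs = true ↔
      ∃ sig ∈ pvSignalsB, sig <:+: logs.toList := by
    simpa [check_completion_signals_py_alt] using pvScanB_iff logs.toList
  exact Bool.eq_iff_iff.mpr (hA.trans hB.symm)
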